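-- pv_equiv track=rewrite | github.com/HuimengZhang/seq_label | util.py | cal_recall
-- ===== SOURCE A (Python) =====
-- def cal_recall(guessed, correct, idx2Label):
--     assert (len(guessed) == len(correct))
--     label_pred = [idx2Label[element] for element in guessed]
--     label_correct = [idx2Label[element] for element in correct]
--     idx = 0
--     correctCount = 0
--     count = 0
--     while idx < len(label_pred):
--         if label_pred[idx][0] == 'B':  # A new chunk starts
--             count += 1
--
--             if label_pred[idx] == label_correct[idx]:
--                 idx += 1
--                 correctlyFound = True
--
--                 while idx < len(label_pred) and label_pred[idx][0] == 'I':  # Scan until it no longer starts with I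
--                     if label_pred[idx] != label_correct[idx]:
--                         correctlyFound = False
--
--                     idx += 1
--
--                 if idx < len(label_pred):
--                     if label_correct[idx][0] == 'I':  # The chunk in correct was longer
--                         correctlyFound = False
--
--                 if correctlyFound:
--                     correctCount += 1
--             else:
--                 idx += 1
--         else:
--             idx += 1
--
--     return count, correctCount
-- ===== SOURCE B (Python) =====
-- def _chunks(labels):
--     """All maximal B-I chunks of a label list, as (start, tuple_of_labels)."""
--     res = []
--     n = len(labels)
--     i = 0
--     while i < n:
--         if labels[i][0] == 'B':
--             chunk = [labels[i]]
--             j = i + 1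
--             while j < n and labels[j][0] == 'I':
--                 chunk.append(labels[j])
--                 j += 1
--             res.append((i, tuple(chunk)))
--             i = j
--         else:
--             i += 1
--     return res
--
--
-- def cal_recall(guessed, correct, idx2Label):
--     assert (len(guessed) == len(correct))
--     label_pred = [idx2Label[e] for e in guessed]
--     label_correct = [idx2Label[e] for e in correct]
--     pred = _chunks(label_pred)
--     cset = set(_chunks(label_correct))
--     return len(pred), sum(1 for ch in pred if ch in cset)
-- ===== Notes on version B (the rewrite author's own statement) =====
-- stated objective: alternative
-- what changed: A's single interleaved while-loop with a correctlyFound flag is replaced by extracting the maximal B/I chunks of the predicted and the correct label sequences independently and counting predicted chunks that occur in the set of correct chunks (keyed by start position and label tuple).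
-- outside the precondition, e.g. on cal_recall([0], [1], {0: 'O', 1: ''}): A returns (0, 0), B raises IndexError
import Mathlib
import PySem

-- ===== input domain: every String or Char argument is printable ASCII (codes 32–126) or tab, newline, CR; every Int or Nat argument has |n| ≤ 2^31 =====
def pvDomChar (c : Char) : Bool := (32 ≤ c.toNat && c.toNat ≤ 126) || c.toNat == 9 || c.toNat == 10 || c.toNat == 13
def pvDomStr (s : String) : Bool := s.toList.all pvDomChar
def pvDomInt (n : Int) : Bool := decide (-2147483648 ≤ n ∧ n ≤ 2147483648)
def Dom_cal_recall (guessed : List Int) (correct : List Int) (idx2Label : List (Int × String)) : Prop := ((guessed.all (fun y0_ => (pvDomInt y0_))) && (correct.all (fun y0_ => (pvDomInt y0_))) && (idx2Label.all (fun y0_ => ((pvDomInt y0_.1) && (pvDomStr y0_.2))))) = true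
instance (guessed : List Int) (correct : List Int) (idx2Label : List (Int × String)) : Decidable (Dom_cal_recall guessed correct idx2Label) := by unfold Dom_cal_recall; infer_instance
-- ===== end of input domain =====

-- B replaces A's interleaved while-loop with a flag by extracting the maximal B/I chunks of both
-- label sequences independently and counting predicted chunks that occur in the set of correct
-- chunks (objective: alternative decomposition, same asymptotic cost).

-- label[0] == c  (Python raises on "" — such inputs are outside Pre_)
def pvFirst (c : Char) (s : String) : Bool := PySem.Str.pyGet? s 0 == some c

-- [idx2Label[e] for e in xs]  (KeyError for a missing key is outside Pre_)
def pvLabels (idx2Label : List (Int × String)) (xs : List Int) : List String :=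
  xs.map (fun e => ((PySem.Dict.mk idx2Label).get? e).getD "")

-- ===== PORT A =====
-- inner 'while idx < len and label_pred[idx][0] == 'I'' loop, carrying correctlyFound
-- (fuel is only a structural-termination guard; callers pass enough for the loop to finish)
def pvInner (lp lc : List String) : Nat → Nat → Bool → Nat × Bool
  | 0, idx, flag => (idx, flag)
  | fuel + 1, idx, flag =>
    if idx < lp.length ∧ pvFirst 'I' (lp.getD idx "") then
      pvInner lp lc fuel (idx + 1) (flag && (lp.getD idx "" == lc.getD idx ""))
    else (idx, flag)

-- outer while loop of A
def pvLoopA (lp lc : List String) : Nat → Nat → Int → Int → Int × Int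
  | 0, _, count, cc => (count, cc)
  | fuel + 1, idx, count, cc =>
    if idx < lp.length then
      if pvFirst 'B' (lp.getD idx "") then
        if lp.getD idx "" == lc.getD idx "" then
          pvLoopA lp lc fuel (pvInner lp lc fuel (idx + 1) true).1 (count + 1)
            (if (if (pvInner lp lc fuel (idx + 1) true).1 < lp.length ∧
                    pvFirst 'I' (lc.getD (pvInner lp lc fuel (idx + 1) true).1 "") then false
                 else (pvInner lp lc fuel (idx + 1) true).2) then cc + 1 else cc)
        else pvLoopA lp lc fuel (idx + 1) (count + 1) cc
      else pvLoopA lp lc fuel (idx + 1) count cc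
    else (count, cc)

def cal_recall (guessed : List Int) (correct : List Int) (idx2Label : List (Int × String)) : Int × Int :=
  pvLoopA (pvLabels idx2Label guessed) (pvLabels idx2Label correct)
    (pvLabels idx2Label guessed).length 0 0 0

-- ===== PORT B =====
-- inner 'while j < n and labels[j][0] == 'I'' of _chunks, collecting the chunk's labels
def pvScanI (labels : List String) : Nat → Nat → List String → Nat × List String
  | 0, j, chunk => (j, chunk)
  | fuel + 1, j, chunk =>
    if j < labels.length ∧ pvFirst 'I' (labels.getD j "") then
      pvScanI labels fuel (j + 1) (chunk ++ [labels.getD j ""])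
    else (j, chunk)

-- outer while loop of _chunks
def pvChunkLoop (labels : List String) : Nat → Nat → List (Nat × List String) → List (Nat × List String)
  | 0, _, acc => acc
  | fuel + 1, i, acc =>
    if i < labels.length then
      if pvFirst 'B' (labels.getD i "") then
        pvChunkLoop labels fuel (pvScanI labels fuel (i + 1) [labels.getD i ""]).1
          (acc ++ [(i, (pvScanI labels fuel (i + 1) [labels.getD i ""]).2)])
      else pvChunkLoop labels fuel (i + 1) acc
    else acc

def pvChunks (labels : List String) : List (Nat × List String) :=
  pvChunkLoop labels labels.length 0 []

def cal_recall_alt (guessed : List Int) (correct : List Int) (idx2Label : List (Int × String)) : Int × Int :=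
  let lp := pvLabels idx2Label guessed
  let lc := pvLabels idx2Label correct
  let pred := pvChunks lp
  let cset := PySem.Set.ofList (pvChunks lc)
  (Int.ofNat pred.length,
   pred.foldl (fun s ch => if ch ∈ cset then s + 1 else s) 0)

-- ===== PRECONDITION & SPEC =====
-- Pre_ excludes inputs on which the Python A raises (length mismatch → AssertionError, a key of
-- guessed/correct missing from idx2Label → KeyError, an empty predicted label → IndexError) and,
-- additionally, inputs whose CORRECT side maps to an empty-string label: there A may still return
-- (it reads correct labels' first characters only at chunk boundaries) while B, which scans every
-- correct label's first character, raises IndexError — see claim.json "cites".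
def Pre_cal_recall (guessed : List Int) (correct : List Int) (idx2Label : List (Int × String)) : Prop :=
  guessed.length = correct.length ∧
  ∀ e ∈ guessed ++ correct, ((PySem.Dict.mk idx2Label).get? e).getD "" ≠ ""

instance (guessed : List Int) (correct : List Int) (idx2Label : List (Int × String)) : Decidable (Pre_cal_recall guessed correct idx2Label) := by unfold Pre_cal_recall; infer_instance

def pvWitness_cal_recall : List Int × List Int × (List (Int × String)) :=
  ([0, 1, 2], [0, 1, 1], [(0, "B-X"), (1, "I-X"), (2, "O")])

def Spec_cal_recall (guessed : List Int) (correct : List Int) (idx2Label : List (Int × String)) (out : Int × Int) : Prop := out = cal_recall_alt guessed correct idx2Label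
instance (guessed : List Int) (correct : List Int) (idx2Label : List (Int × String)) (out : Int × Int) : Decidable (Spec_cal_recall guessed correct idx2Label out) := by unfold Spec_cal_recall; infer_instance

-- ===== CLAIM (what is proved, stated in full; the proofs are below) =====
def Claim_equal_cal_recall : Prop := ∀ (guessed : List Int) (correct : List Int) (idx2Label : List (Int × String)), Dom_cal_recall guessed correct idx2Label → Pre_cal_recall guessed correct idx2Label → Spec_cal_recall guessed correct idx2Label (cal_recall guessed correct idx2Label)

-- ===== LEMMAS AND PROOFS =====

theorem pvFirst_B_not_I (s : String) : pvFirst 'B' s = true → pvFirst 'I' s = false := by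
  unfold pvFirst; cases h : PySem.Str.pyGet? s 0 <;> simp_all

theorem pvFirst_I_not_B (s : String) : pvFirst 'I' s = true → pvFirst 'B' s = false := by
  unfold pvFirst; cases h : PySem.Str.pyGet? s 0 <;> simp_all

-- ghost, fuel-free version of pvScanI (proof side only)
def gScan (l : List String) (j : Nat) : Nat × List String :=
  if h : j < l.length ∧ pvFirst 'I' (l.getD j "") then
    let r := gScan l (j + 1); (r.1, l.getD j "" :: r.2)
  else (j, [])
termination_by l.length - j
decreasing_by omega

theorem gScan_fst_ge (l : List String) (j : Nat) : j ≤ (gScan l j).1 := by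
  fun_induction gScan with
  | case1 j h r ih => simp only [r] at ih ⊢; omega
  | case2 => simp

-- ghost, fuel-free version of pvChunkLoop (proof side only)
def gChunks (l : List String) (i : Nat) : List (Nat × List String) :=
  if h : i < l.length then
    if pvFirst 'B' (l.getD i "") then
      (i, l.getD i "" :: (gScan l (i + 1)).2) :: gChunks l (gScan l (i + 1)).1
    else gChunks l (i + 1)
  else []
termination_by l.length - i
decreasing_by
  · have := gScan_fst_ge l (i + 1); omega
  · omega

theorem pvScanI_eq_gScan (l : List String) :
    ∀ (fuel j : Nat) (chunk : List String), l.length - j ≤ fuel →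
      pvScanI l fuel j chunk = ((gScan l j).1, chunk ++ (gScan l j).2) := by
  intro fuel
  induction fuel with
  | zero =>
      intro j chunk hf
      rw [pvScanI, gScan, dif_neg (by omega)]
      simp
  | succ fuel ih =>
      intro j chunk hf
      rw [pvScanI, gScan]
      by_cases h : j < l.length ∧ pvFirst 'I' (l.getD j "") = true
      · rw [if_pos h, dif_pos h, ih (j + 1) _ (by omega)]
        simp
      · rw [if_neg h, dif_neg h]
        simp

theorem pvChunkLoop_eq_gChunks (l : List String) :
    ∀ (fuel i : Nat) (acc : List (Nat × List String)), l.length - i ≤ fuel →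
      pvChunkLoop l fuel i acc = acc ++ gChunks l i := by
  intro fuel
  induction fuel with
  | zero =>
      intro i acc hf
      rw [pvChunkLoop, gChunks, dif_neg (by omega)]
      simp
  | succ fuel ih =>
      intro i acc hf
      rw [pvChunkLoop, gChunks]
      by_cases h : i < l.length
      · rw [if_pos h, dif_pos h]
        by_cases hB : pvFirst 'B' (l.getD i "") = true
        · rw [if_pos hB, if_pos hB]
          rw [pvScanI_eq_gScan l fuel (i + 1) [l.getD i ""] (by omega)]
          have hge := gScan_fst_ge l (i + 1)
          rw [ih _ _ (by omega)]
          simp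
        · rw [if_neg hB, if_neg hB, ih _ _ (by omega)]
      · rw [if_neg h, dif_neg h]
        simp

theorem gScan_snd (l : List String) (j : Nat) :
    (gScan l j).2 = (List.range' j ((gScan l j).1 - j)).map (fun k => l.getD k "") := by
  fun_induction gScan with
  | case1 j h r ih =>
      simp only [r] at *
      have hge := gScan_fst_ge l (j + 1)
      have : (gScan l (j + 1)).1 - j = ((gScan l (j + 1)).1 - (j + 1)) + 1 := by omega
      rw [this, List.range'_succ]
      simp [ih]
  | case2 j h => simp

theorem gScan_mid (l : List String) (j : Nat) :
    ∀ k, j ≤ k → k < (gScan l j).1 → k < l.length ∧ pvFirst 'I' (l.getD k "") = true := by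
  fun_induction gScan with
  | case1 j h r ih =>
      simp only [r] at *
      intro k hk1 hk2
      rcases Nat.eq_or_lt_of_le hk1 with rfl | hlt
      · exact ⟨h.1, h.2⟩
      · exact ih k hlt hk2
  | case2 j h => intro k hk1 hk2; simp at hk2; omega

theorem gScan_stop (l : List String) (j : Nat) :
    ¬((gScan l j).1 < l.length ∧ pvFirst 'I' (l.getD (gScan l j).1 "") = true) := by
  fun_induction gScan with
  | case1 j h r ih => simp only [r] at *; exact ih
  | case2 j h => simpa using h

theorem gScan_unique (l : List String) (j : Nat) :
    ∀ e, j ≤ e →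
      (∀ k, j ≤ k → k < e → k < l.length ∧ pvFirst 'I' (l.getD k "") = true) →
      ¬(e < l.length ∧ pvFirst 'I' (l.getD e "") = true) →
      (gScan l j).1 = e := by
  fun_induction gScan with
  | case1 j h r ih =>
      simp only [r] at *
      intro e hje hmid hstop
      rcases Nat.eq_or_lt_of_le hje with rfl | hlt
      · exact absurd h hstop
      · exact ih e hlt (fun k hk1 hk2 => hmid k (by omega) hk2) hstop
  | case2 j h =>
      intro e hje hmid hstop
      rcases Nat.eq_or_lt_of_le hje with rfl | hlt
      · rfl
      · exact absurd (hmid j le_rfl hlt) h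

-- the chunk of l starting at s (its B label followed by the maximal I-run)
def cAt (l : List String) (s : Nat) : List String := l.getD s "" :: (gScan l (s + 1)).2

theorem gChunks_mem (l : List String) (i : Nat) (x : Nat × List String) :
    x ∈ gChunks l i ↔
      ∃ s, i ≤ s ∧ s < l.length ∧ pvFirst 'B' (l.getD s "") = true ∧ x = (s, cAt l s) := by
  fun_induction gChunks with
  | case1 i h hB ih =>
      rw [List.mem_cons, ih]
      constructor
      · rintro (rfl | ⟨s, hs1, hs2, hs3, rfl⟩)
        · exact ⟨i, le_rfl, h, hB, rfl⟩
        · have := gScan_fst_ge l (i + 1)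
          exact ⟨s, by omega, hs2, hs3, rfl⟩
      · rintro ⟨s, hs1, hs2, hs3, rfl⟩
        rcases Nat.eq_or_lt_of_le hs1 with rfl | hlt
        · exact Or.inl rfl
        · right
          refine ⟨s, ?_, hs2, hs3, rfl⟩
          by_contra hcon
          have hmid := gScan_mid l (i + 1) s (by omega) (by omega)
          have := pvFirst_B_not_I _ hs3
          rw [this] at hmid
          exact absurd hmid.2 (by simp)
  | case2 i h hB ih =>
      rw [ih]
      constructor
      · rintro ⟨s, hs1, hs2, hs3, rfl⟩; exact ⟨s, by omega, hs2, hs3, rfl⟩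
      · rintro ⟨s, hs1, hs2, hs3, rfl⟩
        rcases Nat.eq_or_lt_of_le hs1 with rfl | hlt
        · exact absurd hs3 hB
        · exact ⟨s, hlt, hs2, hs3, rfl⟩
  | case3 i h =>
      simp only [List.not_mem_nil, false_iff]
      rintro ⟨s, hs1, hs2, _, _⟩
      omega

theorem map_range'_inj {α : Type} (f g : Nat → α) :
    ∀ (n a : Nat), (List.range' a n).map f = (List.range' a n).map g →
      ∀ k, a ≤ k → k < a + n → f k = g k := by
  intro n
  induction n with
  | zero => intro a _ k h1 h2; omega
  | succ n ih =>
      intro a h k h1 h2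
      rw [List.range'_succ] at h
      simp only [List.map_cons, List.cons.injEq] at h
      rcases Nat.eq_or_lt_of_le h1 with rfl | hlt
      · exact h.1
      · exact ih (a + 1) h.2 k hlt (by omega)

theorem pvInner_spec (lp lc : List String) :
    ∀ (fuel i : Nat) (f : Bool), lp.length - i ≤ fuel →
      pvInner lp lc fuel i f =
        ((gScan lp i).1,
         f && (List.range' i ((gScan lp i).1 - i)).all (fun k => lp.getD k "" == lc.getD k "")) := by
  intro fuel
  induction fuel with
  | zero =>
      intro i f hf
      rw [pvInner, gScan, dif_neg (by omega)]
      simp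
  | succ fuel ih =>
      intro i f hf
      rw [pvInner, gScan]
      by_cases h : i < lp.length ∧ pvFirst 'I' (lp.getD i "") = true
      · rw [if_pos h, dif_pos h, ih (i + 1) _ (by omega)]
        have hge := gScan_fst_ge lp (i + 1)
        have hr : (gScan lp (i + 1)).1 - i = ((gScan lp (i + 1)).1 - (i + 1)) + 1 := by omega
        rw [hr, List.range'_succ]
        simp [Bool.and_assoc]
      · rw [if_neg h, dif_neg h]
        simp

theorem cAt_eq_iff (lp lc : List String) (hlen : lp.length = lc.length) (s : Nat)
    (hs : s < lp.length) (hhd : lp.getD s "" = lc.getD s "") :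
    cAt lp s = cAt lc s ↔
      ((List.range' (s + 1) ((gScan lp (s + 1)).1 - (s + 1))).all
          (fun k => lp.getD k "" == lc.getD k "") = true ∧
       ¬((gScan lp (s + 1)).1 < lp.length ∧
          pvFirst 'I' (lc.getD (gScan lp (s + 1)).1 "") = true)) := by
  have hge := gScan_fst_ge lp (s + 1)
  constructor
  · intro heq
    unfold cAt at heq
    rw [List.cons.injEq] at heq
    have htl := heq.2
    rw [gScan_snd, gScan_snd] at htl
    have hge' := gScan_fst_ge lc (s + 1)
    have hlen2 : (gScan lp (s + 1)).1 - (s + 1) = (gScan lc (s + 1)).1 - (s + 1) := by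
      have := congrArg List.length htl
      simpa using this
    have he : (gScan lc (s + 1)).1 = (gScan lp (s + 1)).1 := by omega
    rw [he] at htl
    have hstop' := gScan_stop lc (s + 1)
    rw [he] at hstop'
    constructor
    · rw [List.all_eq_true]
      intro k hk
      rw [List.mem_range'_1] at hk
      have := map_range'_inj _ _ _ _ htl k hk.1 (by omega)
      simpa using this
    · rw [hlen]; exact hstop'
  · rintro ⟨hall, hstop⟩
    have hmid' : ∀ k, s + 1 ≤ k → k < (gScan lp (s + 1)).1 →
        lp.getD k "" = lc.getD k "" := by
      intro k hk1 hk2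
      rw [List.all_eq_true] at hall
      have := hall k (by rw [List.mem_range'_1]; omega)
      simpa using this
    have he : (gScan lc (s + 1)).1 = (gScan lp (s + 1)).1 := by
      apply gScan_unique
      · omega
      · intro k hk1 hk2
        have h1 := gScan_mid lp (s + 1) k hk1 hk2
        refine ⟨by omega, ?_⟩
        rw [← hmid' k hk1 hk2]; exact h1.2
      · rw [← hlen]; exact hstop
    unfold cAt
    rw [List.cons.injEq]
    refine ⟨hhd, ?_⟩
    rw [gScan_snd, gScan_snd, he]
    apply List.map_congr_left
    intro k hk
    rw [List.mem_range'_1] at hk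
    exact hmid' k hk.1 (by omega)

theorem gChunks_skip (l : List String) :
    ∀ (n j e : Nat), e - j ≤ n → j ≤ e →
      (∀ k, j ≤ k → k < e → k < l.length ∧ pvFirst 'B' (l.getD k "") = false) →
      gChunks l j = gChunks l e := by
  intro n
  induction n with
  | zero =>
      intro j e h1 h2 _
      obtain rfl : j = e := by omega
      rfl
  | succ n ih =>
      intro j e h1 h2 hmid
      rcases Nat.eq_or_lt_of_le h2 with rfl | hlt
      · rfl
      · have hj := hmid j le_rfl hlt
        rw [gChunks, dif_pos hj.1, if_neg (by rw [hj.2]; simp)]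
        exact ih (j + 1) e (by omega) (by omega) (fun k hk1 hk2 => hmid k (by omega) hk2)

theorem loopA_eq (lp lc : List String) (hlen : lp.length = lc.length) :
    ∀ (fuel i : Nat) (c cc : Int), lp.length - i ≤ fuel →
      pvLoopA lp lc fuel i c cc =
        (c + Int.ofNat (gChunks lp i).length,
         cc + Int.ofNat ((gChunks lp i).countP (fun ch => decide (ch ∈ gChunks lc 0)))) := by
  intro fuel
  induction fuel with
  | zero =>
      intro i c cc hf
      rw [pvLoopA, gChunks, dif_neg (by omega)]
      simp
  | succ fuel ih =>
      intro i c cc hf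
      rw [pvLoopA]
      by_cases h : i < lp.length
      · rw [if_pos h]
        by_cases hB : pvFirst 'B' (lp.getD i "") = true
        · rw [if_pos hB]
          rw [gChunks, dif_pos h, if_pos hB]
          by_cases hhd : (lp.getD i "" == lc.getD i "") = true
          · rw [if_pos hhd]
            have hhd' : lp.getD i "" = lc.getD i "" := by simpa using hhd
            rw [pvInner_spec lp lc fuel (i + 1) true (by omega)]
            have hge := gScan_fst_ge lp (i + 1)
            rw [ih _ _ _ (by omega)]
            have hmem : ((i, cAt lp i) ∈ gChunks lc 0) ↔ cAt lp i = cAt lc i := by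
              rw [gChunks_mem]
              constructor
              · rintro ⟨s, _, _, _, heq⟩
                obtain rfl : i = s := by
                  have := congrArg Prod.fst heq; simpa using this
                have := congrArg Prod.snd heq; simpa using this
              · intro heq
                refine ⟨i, by omega, by omega, ?_, by rw [heq]⟩
                rw [← hhd']; exact hB
            have hiff := hmem.trans (cAt_eq_iff lp lc hlen i h hhd')
            have hgood : decide ((i, cAt lp i) ∈ gChunks lc 0) =
                (if (gScan lp (i + 1)).1 < lp.length ∧
                    pvFirst 'I' (lc.getD (gScan lp (i + 1)).1 "") = true then false
                 else true && (List.range' (i + 1) ((gScan lp (i + 1)).1 - (i + 1))).all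
                    (fun k => lp.getD k "" == lc.getD k "")) := by
              split
              · next hb =>
                  rw [decide_eq_false_iff_not, hiff]
                  tauto
              · next hb =>
                  rw [Bool.true_and]
                  by_cases hall : (List.range' (i + 1) ((gScan lp (i + 1)).1 - (i + 1))).all
                      (fun k => lp.getD k "" == lc.getD k "") = true
                  · rw [hall, decide_eq_true_eq]
                    exact hiff.mpr ⟨hall, hb⟩
                  · rw [Bool.eq_false_iff.mpr hall, decide_eq_false_iff_not, hiff]
                    tauto
            rw [show lp.getD i "" :: (gScan lp (i + 1)).2 = cAt lp i from rfl]
            simp only [List.length_cons, List.countP_cons, hgood]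
            by_cases hfl : (if (gScan lp (i + 1)).1 < lp.length ∧
                pvFirst 'I' (lc.getD (gScan lp (i + 1)).1 "") = true then false
               else true && (List.range' (i + 1) ((gScan lp (i + 1)).1 - (i + 1))).all
                  (fun k => lp.getD k "" == lc.getD k "")) = true <;>
              simp only [hfl, if_true, if_false] <;>
              simp [Prod.ext_iff] <;>
              omega
          · rw [if_neg hhd]
            have hhd' : ¬ lp.getD i "" = lc.getD i "" := by simpa using hhd
            have hge := gScan_fst_ge lp (i + 1)
            have hskip : gChunks lp (i + 1) = gChunks lp (gScan lp (i + 1)).1 := by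
              apply gChunks_skip lp ((gScan lp (i + 1)).1 - (i + 1)) _ _ le_rfl hge
              intro k hk1 hk2
              have := gScan_mid lp (i + 1) k hk1 hk2
              exact ⟨this.1, pvFirst_I_not_B _ this.2⟩
            have hnmem : decide ((i, cAt lp i) ∈ gChunks lc 0) = false := by
              simp only [decide_eq_false_iff_not]
              rw [gChunks_mem]
              rintro ⟨s, _, _, _, heq⟩
              obtain rfl : i = s := by
                have := congrArg Prod.fst heq; simpa using this
              have := congrArg Prod.snd heq
              apply hhd'
              have hcc : cAt lp i = cAt lc i := by simpa using this
              unfold cAt at hcc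
              exact (List.cons.injEq _ _ _ _).mp hcc |>.1
            rw [ih _ _ _ (by omega), hskip]
            rw [show lp.getD i "" :: (gScan lp (i + 1)).2 = cAt lp i from rfl]
            simp only [List.length_cons, List.countP_cons, hnmem]
            simp [Prod.ext_iff]
            all_goals omega
        · rw [if_neg hB, gChunks, dif_pos h, if_neg hB]
          exact ih _ _ _ (by omega)
      · rw [if_neg h, gChunks, dif_neg h]
        simp

theorem cal_recall_main : ∀ (lp lc : List String), lp.length = lc.length →
    pvLoopA lp lc lp.length 0 0 0 =
      (Int.ofNat (pvChunks lp).length,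
       (pvChunks lp).foldl
         (fun s ch => if ch ∈ PySem.Set.ofList (pvChunks lc) then s + 1 else s) 0) := by
  intro lp lc hlen
  have hch : ∀ l : List String, pvChunks l = gChunks l 0 := by
    intro l
    unfold pvChunks
    rw [pvChunkLoop_eq_gChunks l l.length 0 [] (by omega)]
    simp
  rw [loopA_eq lp lc hlen lp.length 0 0 0 (by omega), hch, hch]
  rw [PySem.List.foldl_ite_add_one]
  have hcp : (gChunks lp 0).countP (fun ch => decide (ch ∈ PySem.Set.ofList (gChunks lc 0)))
      = (gChunks lp 0).countP (fun ch => decide (ch ∈ gChunks lc 0)) := by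
    apply List.countP_congr
    intro ch _
    simp [PySem.Set.mem_ofList]
  rw [hcp]
  simp

-- ===== VERDICT (by name: the statement is the Claim_ definition above) =====
theorem cal_recall_spec : Claim_equal_cal_recall := by
  intro guessed correct idx2Label _ hpre
  have hlen : (pvLabels idx2Label guessed).length = (pvLabels idx2Label correct).length := by
    simp [pvLabels, hpre.1]
  unfold Spec_cal_recall cal_recall cal_recall_alt
  exact cal_recall_main _ _ hlen
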